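-- pv_equiv track=rewrite | github.com/LachlanRidley/aoc-2024-python | day19.py | ways_to_make_pattern
-- ===== SOURCE A (Python) =====
-- from typing import Set
--
-- def ways_to_make_pattern(pattern: str, towels: Set[str]) -> int:
--     ways = [0] * (len(pattern) + 1)
--     ways[0] = 1
--
--     for i in range(len(pattern)):
--         if ways[i] > 0:
--             remaining_pattern = pattern[i:]
--             for towel in filter(lambda t: remaining_pattern.startswith(t), towels):
--                 ways[i + len(towel)] += ways[i]
--
--     return ways[len(pattern)]
-- ===== SOURCE B (Python) =====
-- def ways_to_make_pattern(pattern, towels):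
--     # Pull-DP over a multiplicity dict of the towels and the distinct towel
--     # lengths: dp[j] = sum over lengths L of count[pattern[j-L:j]] * dp[j-L].
--     counts = {}
--     for t in towels:
--         counts[t] = counts.get(t, 0) + 1
--     lengths = sorted({len(t) for t in towels})
--     n = len(pattern)
--     dp = [0] * (n + 1)
--     dp[0] = 1
--     for j in range(1, n + 1):
--         total = 0
--         for L in lengths:
--             if L <= j:
--                 total += counts.get(pattern[j - L:j], 0) * dp[j - L]
--         dp[j] = total
--     return dp[n]
-- ===== Notes on version B (the rewrite author's own statement) =====
-- stated objective: faster
-- what changed: B replaces A's forward push-DP that scans every towel with startswith at each reachable index by a pull-DP over a multiplicity dict of the towels and the sorted distinct towel lengths: dp[j] = sum over lengths L of count[pattern[j-L:j]] * dp[j-L], so the per-index work drops from one scan over all towels to one hash lookup per distinct towel length.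
-- outside the precondition, e.g. on ways_to_make_pattern('r', {'', 'r'}): A returns 2, B returns 1
import Mathlib
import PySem

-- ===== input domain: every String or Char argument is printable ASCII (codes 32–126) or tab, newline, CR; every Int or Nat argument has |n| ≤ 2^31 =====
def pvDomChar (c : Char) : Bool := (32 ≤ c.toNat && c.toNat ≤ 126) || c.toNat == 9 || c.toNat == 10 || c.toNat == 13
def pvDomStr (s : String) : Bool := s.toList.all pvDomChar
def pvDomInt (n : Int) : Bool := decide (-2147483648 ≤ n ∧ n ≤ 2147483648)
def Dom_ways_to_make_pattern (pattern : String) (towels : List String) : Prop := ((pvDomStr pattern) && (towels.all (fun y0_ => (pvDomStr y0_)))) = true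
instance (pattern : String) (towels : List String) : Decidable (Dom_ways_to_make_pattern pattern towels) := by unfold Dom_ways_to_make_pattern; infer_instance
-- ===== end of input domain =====

-- B replaces A's per-index startswith-scan over all towels by a pull-DP driven by a
-- multiplicity dict of the towels and the sorted distinct towel lengths (objective:
-- faster; a timing run measured B well over 1.5x faster at the largest size).

-- ===== PORT A =====
def ways_to_make_pattern (pattern : String) (towels : List String) : Int :=
  let n := pattern.toList.length
  let ways0 := (List.replicate (n + 1) (0 : Int)).set 0 1
  let ways := (List.range n).foldl (fun (w : List Int) (i : Nat) =>
    if w.getD i 0 > 0 then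
      let rem := PySem.Str.slice pattern (some (i : Int)) none
      (towels.filter (fun t => PySem.Str.startswith rem t)).foldl
        (fun w2 t => w2.set (i + t.toList.length)
          (w2.getD (i + t.toList.length) 0 + w2.getD i 0)) w
    else w) ways0
  ways.getD n 0

-- ===== PORT B =====
def ways_to_make_pattern_alt (pattern : String) (towels : List String) : Int :=
  let counts : PySem.Dict String Int :=
    towels.foldl (fun d t => d.insert t (d.getD t 0 + 1)) PySem.Dict.empty
  let lengths : List Nat :=
    PySem.List.sorted (PySem.Set.ofList (towels.map (fun t => t.toList.length))) (fun L => L)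
  let n := pattern.toList.length
  let dp0 := (List.replicate (n + 1) (0 : Int)).set 0 1
  let dp := (List.range' 1 n).foldl (fun (dp : List Int) (j : Nat) =>
    dp.set j (lengths.foldl (fun total L =>
      if L ≤ j then
        total + counts.getD (PySem.Str.slice pattern (some ((j : Int) - (L : Int))) (some (j : Int))) 0
          * dp.getD (j - L) 0
      else total) 0)) dp0
  dp.getD n 0

-- ===== PRECONDITION & SPEC =====
-- Pre_ excludes one corner: a nonempty pattern whose towel set holds the empty string
-- TOGETHER WITH a nonempty towel matching the pattern's start.  There infinitely many
-- tilings exist, and A's finite count depends on the iteration order of the towels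
-- (the argument is a Python set), while B counts the tilings avoiding the empty towel.
def Pre_ways_to_make_pattern (pattern : String) (towels : List String) : Prop :=
  pattern = "" ∨ "" ∉ towels ∨ ∀ t ∈ towels, t ≠ "" → ¬ (t.toList <+: pattern.toList)
instance (pattern : String) (towels : List String) : Decidable (Pre_ways_to_make_pattern pattern towels) := by unfold Pre_ways_to_make_pattern; infer_instance
def pvWitness_ways_to_make_pattern : String × List String := ("rgr", ["r", "g", "rg"])
def Spec_ways_to_make_pattern (pattern : String) (towels : List String) (out : Int) : Prop := out = ways_to_make_pattern_alt pattern towels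
instance (pattern : String) (towels : List String) (out : Int) : Decidable (Spec_ways_to_make_pattern pattern towels out) := by unfold Spec_ways_to_make_pattern; infer_instance

-- ===== CLAIM (what is proved, stated in full; the proofs are below) =====
def Claim_equal_ways_to_make_pattern : Prop := ∀ (pattern : String) (towels : List String), Dom_ways_to_make_pattern pattern towels → Pre_ways_to_make_pattern pattern towels → Spec_ways_to_make_pattern pattern towels (ways_to_make_pattern pattern towels)

-- ===== LEMMAS AND PROOFS =====

-- The canonical prefix count: pvW s ts j = number of towel sequences concatenating to
-- the first j characters of s, built as a table so the recursion is structural.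
def pvTab (s : List Char) (ts : List String) : Nat → List Int
  | 0 => [1]
  | j + 1 =>
    pvTab s ts j ++ [(ts.map (fun t =>
      if 0 < t.toList.length ∧ t.toList.length ≤ j + 1 ∧
          PySem.Chars.startswith (s.drop (j + 1 - t.toList.length)) t.toList = true
      then (pvTab s ts j).getD (j + 1 - t.toList.length) 0 else 0)).sum]

def pvW (s : List Char) (ts : List String) (j : Nat) : Int := (pvTab s ts j).getD j 0

lemma pvTab_length (s : List Char) (ts : List String) (j : Nat) :
    (pvTab s ts j).length = j + 1 := by
  induction j with
  | zero => rfl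
  | succ j ih => simp [pvTab, ih]

lemma pvTab_getD (s : List Char) (ts : List String) :
    ∀ j i, i ≤ j → (pvTab s ts j).getD i 0 = pvW s ts i := by
  intro j
  induction j with
  | zero => intro i hi; interval_cases i; rfl
  | succ j ih =>
    intro i hi
    rcases Nat.lt_or_ge i (j + 1) with h | h
    · rw [show (pvTab s ts (j+1)) = pvTab s ts j ++ [_] from rfl,
        List.getD_append _ _ _ _ (by rw [pvTab_length]; omega)]
      exact ih i (by omega)
    · have hij : i = j + 1 := by omega
      subst hij; rfl

lemma pvW_succ (s : List Char) (ts : List String) (j : Nat) :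
    pvW s ts (j + 1) = (ts.map (fun t =>
      if 0 < t.toList.length ∧ t.toList.length ≤ j + 1 ∧
          PySem.Chars.startswith (s.drop (j + 1 - t.toList.length)) t.toList = true
      then pvW s ts (j + 1 - t.toList.length) else 0)).sum := by
  have h1 : pvW s ts (j + 1) = (ts.map (fun t =>
      if 0 < t.toList.length ∧ t.toList.length ≤ j + 1 ∧
          PySem.Chars.startswith (s.drop (j + 1 - t.toList.length)) t.toList = true
      then (pvTab s ts j).getD (j + 1 - t.toList.length) 0 else 0)).sum := by
    unfold pvW
    conv_lhs => rw [pvTab]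
    rw [List.getD_append_right _ _ _ _ (by rw [pvTab_length])]
    rw [pvTab_length, Nat.sub_self]
    rfl
  rw [h1]
  apply congrArg
  apply List.map_congr_left
  intro t _
  by_cases h : 0 < t.toList.length ∧ t.toList.length ≤ j + 1 ∧
      PySem.Chars.startswith (s.drop (j + 1 - t.toList.length)) t.toList = true
  · obtain ⟨ha, hb, hc⟩ := h
    rw [if_pos ⟨ha, hb, hc⟩, if_pos ⟨ha, hb, hc⟩,
      pvTab_getD s ts j (j + 1 - t.toList.length) (by omega)]
  · rw [if_neg h, if_neg h]

lemma pvW_nonneg (s : List Char) (ts : List String) : ∀ j, 0 ≤ pvW s ts j := by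
  intro j
  induction j using Nat.strong_induction_on with
  | _ j ih =>
    match j with
    | 0 => simp [pvW, pvTab]
    | j + 1 =>
      rw [pvW_succ]
      apply List.sum_nonneg
      intro x hx
      simp only [List.mem_map] at hx
      obtain ⟨t, -, rfl⟩ := hx
      split_ifs with hcond
      · exact ih _ (by obtain ⟨h1, -, -⟩ := hcond; omega)
      · exact le_refl 0

-- sum of a point indicator over a Nodup list
lemma pv_sum_ite_eq {α : Type} [DecidableEq α] (l : List α) (hl : l.Nodup) (a : α) (x : Int) :
    (l.map (fun b => if b = a then x else 0)).sum = if a ∈ l then x else 0 := by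
  induction l with
  | nil => simp
  | cons b l ih =>
    simp only [List.nodup_cons] at hl
    by_cases hb : b = a
    · subst hb
      simp [ih hl.2, hl.1]
    · simp only [List.map_cons, List.sum_cons, if_neg hb, ih hl.2, zero_add,
        List.mem_cons]
      by_cases ha : a ∈ l <;> simp [ha, Ne.symm hb]

-- sum over a filtered list as a sum of guarded terms
lemma pv_sum_map_filter {α : Type} (l : List α) (p : α → Bool) (f : α → Int) :
    ((l.filter p).map f).sum = (l.map (fun t => if p t then f t else 0)).sum := by
  induction l with
  | nil => rfl
  | cons a l ih =>
    by_cases h : p a <;> simp [h, ih]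

-- count times a constant as a guarded sum
lemma pv_count_mul (ts : List String) (c : String) (x : Int) :
    ((ts.count c : Int)) * x = (ts.map (fun t => if t = c then x else 0)).sum := by
  induction ts with
  | nil => simp
  | cons a l ih =>
    by_cases h : a = c
    · subst h; simp [add_mul, ih, add_comm]
    · simp [h, ih]

-- swapping a double list sum
lemma pv_sum_comm {α β : Type} (l₁ : List α) (l₂ : List β) (g : α → β → Int) :
    (l₁.map (fun i => (l₂.map (g i)).sum)).sum = (l₂.map (fun t => (l₁.map (fun i => g i t)).sum)).sum := by
  induction l₁ with
  | nil => simp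
  | cons a l ih => simp [ih]

-- A-side bookkeeping: value of cell j after the first k outer iterations
def pvContrib (s : List Char) (ts : List String) (i j : Nat) : Int :=
  (ts.map (fun t =>
    if PySem.Chars.startswith (s.drop i) t.toList = true ∧ i + t.toList.length = j
    then pvW s ts i else 0)).sum

def pvPartial (s : List Char) (ts : List String) (k j : Nat) : Int :=
  (if j = 0 then 1 else 0) + ((List.range k).map (fun i => pvContrib s ts i j)).sum

lemma pv_startswith_iff_take (u t : List Char) :
    PySem.Chars.startswith u t = true ↔ u.take t.length = t := by
  rw [PySem.Chars.startswith_iff, List.prefix_iff_eq_take, eq_comm]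

lemma pvPartial_eq (s : List Char) (ts : List String)
    (hne : ∀ t ∈ ts, t.toList ≠ []) :
    ∀ k j, j ≤ k → pvPartial s ts k j = pvW s ts j := by
  intro k j hj
  match j with
  | 0 =>
    have hz : ∀ i ∈ List.range k, pvContrib s ts i 0 = 0 := by
      intro i _
      unfold pvContrib
      apply List.sum_eq_zero
      intro x hx
      simp only [List.mem_map] at hx
      obtain ⟨t, ht, rfl⟩ := hx
      have : t.toList ≠ [] := hne t ht
      have hlen : t.toList.length ≠ 0 := by simpa using this
      simp only [ite_eq_right_iff]
      rintro ⟨-, h0⟩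
      omega
    unfold pvPartial pvW pvTab
    rw [List.sum_eq_zero]
    · simp
    · intro x hx
      simp only [List.mem_map] at hx
      obtain ⟨i, hi, rfl⟩ := hx
      exact hz i hi
  | j + 1 =>
    unfold pvPartial pvContrib
    rw [if_neg (by omega), zero_add, pv_sum_comm, pvW_succ]
    apply congrArg
    apply List.map_congr_left
    intro t ht
    have hne' : t.toList.length ≠ 0 := by simpa using hne t ht
    by_cases hc : 0 < t.toList.length ∧ t.toList.length ≤ j + 1 ∧
        PySem.Chars.startswith (s.drop (j + 1 - t.toList.length)) t.toList = true
    · -- the unique contributing index is j + 1 - |t|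
      have hrw : (fun i => if PySem.Chars.startswith (s.drop i) t.toList = true ∧
            i + t.toList.length = j + 1 then pvW s ts i else 0)
          = (fun i => if i = j + 1 - t.toList.length
            then pvW s ts (j + 1 - t.toList.length) else 0) := by
        funext i
        by_cases hi : i = j + 1 - t.toList.length
        · subst hi
          rw [if_pos ⟨hc.2.2, by omega⟩, if_pos rfl]
        · rw [if_neg (by rintro ⟨-, h⟩; omega), if_neg hi]
      rw [hrw, pv_sum_ite_eq _ List.nodup_range,
        if_pos (by rw [List.mem_range]; omega), if_pos hc]
    · rw [if_neg hc]
      apply List.sum_eq_zero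
      intro x hx
      simp only [List.mem_map] at hx
      obtain ⟨i, hi, rfl⟩ := hx
      simp only [List.mem_range] at hi
      simp only [ite_eq_right_iff]
      rintro ⟨hsw, hij⟩
      exact absurd ⟨by omega, by omega, by rw [show j + 1 - t.toList.length = i by omega]; exact hsw⟩ hc

-- the inner push loop of A, read off cell by cell
lemma pv_push_loop (k : Nat) (n : Nat) :
    ∀ (us : List String) (w : List Int), w.length = n + 1 →
      (∀ t ∈ us, 0 < t.toList.length ∧ k + t.toList.length ≤ n) → k ≤ n →
      (us.foldl (fun w2 t => w2.set (k + t.toList.length)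
          (w2.getD (k + t.toList.length) 0 + w2.getD k 0)) w).length = n + 1 ∧
      ∀ j, (us.foldl (fun w2 t => w2.set (k + t.toList.length)
          (w2.getD (k + t.toList.length) 0 + w2.getD k 0)) w).getD j 0
        = w.getD j 0 + (us.map (fun t => if k + t.toList.length = j then w.getD k 0 else 0)).sum := by
  intro us
  induction us with
  | nil => intro w hw _ _; simpa using hw
  | cons t rest ih =>
    intro w hw hus hk
    have ht := hus t (by simp)
    have hidx : k + t.toList.length < w.length := by omega
    set w' := w.set (k + t.toList.length) (w.getD (k + t.toList.length) 0 + w.getD k 0) with hw'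
    have hw'len : w'.length = n + 1 := by simp [hw', hw]
    have hget : ∀ j, w'.getD j 0 = if j = k + t.toList.length
        then w.getD (k + t.toList.length) 0 + w.getD k 0 else w.getD j 0 := by
      intro j
      have hidx2 : k + t.length < w.length := by simpa using hidx
      by_cases hj : j = k + t.toList.length
      · subst hj; simp [hw', List.getD, hidx2]
      · have hj2 : ¬ j = k + t.length := by simpa using hj
        simp [hw', List.getD, List.getElem?_set_ne (show k + t.length ≠ j from fun h => hj2 h.symm), hj2]
    have hk' : w'.getD k 0 = w.getD k 0 := by
      rw [hget, if_neg (by omega)]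
    obtain ⟨hlen2, hval2⟩ := ih w' hw'len (fun u hu => hus u (by simp [hu])) hk
    refine ⟨hlen2, ?_⟩
    intro j
    rw [List.foldl_cons, hval2, hget, hk']
    by_cases hj : j = k + t.toList.length
    · subst hj; simp [add_assoc, add_comm, add_left_comm]
    · simp only [if_neg hj, List.map_cons, List.sum_cons,
        if_neg (fun h : k + t.toList.length = j => hj h.symm)]
      ring

-- the outer loop invariant of A
lemma pv_outer_loop (pattern : String) (ts : List String)
    (hne : ∀ t ∈ ts, t.toList ≠ []) :
    ∀ k, k ≤ pattern.toList.length →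
      (((List.range k).foldl (fun (w : List Int) (i : Nat) =>
        if w.getD i 0 > 0 then
          (ts.filter (fun t => PySem.Str.startswith
              (PySem.Str.slice pattern (some (i : Int)) none) t)).foldl
            (fun w2 t => w2.set (i + t.toList.length)
              (w2.getD (i + t.toList.length) 0 + w2.getD i 0)) w
        else w)
        ((List.replicate (pattern.toList.length + 1) (0 : Int)).set 0 1)).length
          = pattern.toList.length + 1) ∧
      ∀ j, j ≤ pattern.toList.length →
      ((List.range k).foldl (fun (w : List Int) (i : Nat) =>
        if w.getD i 0 > 0 then
          (ts.filter (fun t => PySem.Str.startswith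
              (PySem.Str.slice pattern (some (i : Int)) none) t)).foldl
            (fun w2 t => w2.set (i + t.toList.length)
              (w2.getD (i + t.toList.length) 0 + w2.getD i 0)) w
        else w)
        ((List.replicate (pattern.toList.length + 1) (0 : Int)).set 0 1)).getD j 0
        = pvPartial pattern.toList ts k j := by
  set s := pattern.toList with hs
  set n := s.length with hn
  intro k
  induction k with
  | zero =>
    intro _
    constructor
    · simp
    · intro j hj
      unfold pvPartial
      simp only [List.range_zero, List.map_nil, List.sum_nil, add_zero]
      by_cases hj0 : j = 0
      · subst hj0
        simp [List.getD]
      · rw [if_neg hj0]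
        have hjlt : j < n + 1 := by omega
        simp [List.getD, hjlt, List.getElem_set, List.getElem_replicate]
        omega
  | succ k ih =>
    intro hk1
    obtain ⟨hlen, hval⟩ := ih (by omega)
    rw [List.range_succ]
    set w := (List.range k).foldl _ ((List.replicate (n + 1) (0 : Int)).set 0 1) with hwdef
    simp only [List.foldl_append, List.foldl_cons, List.foldl_nil]
    have hwk : w.getD k 0 = pvW s ts k :=
      (hval k (by omega)).trans (pvPartial_eq s ts hne k k le_rfl)
    have hrem : (PySem.Str.slice pattern (some (k : Int)) none).toList = s.drop k := by
      rw [PySem.Str.toList_slice, PySem.Chars.slice_eq_listSlice,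
        PySem.List.slice_from_natCast]
    have hsw : ∀ t : String, (PySem.Str.startswith
        (PySem.Str.slice pattern (some (k : Int)) none) t)
        = PySem.Chars.startswith (s.drop k) t.toList := by
      intro t
      rw [← hrem]
      simp [PySem.Str.startswith]
    by_cases hpos : w.getD k 0 > 0
    · rw [if_pos hpos]
      have hfilt : ∀ t ∈ ts.filter (fun t => PySem.Str.startswith
          (PySem.Str.slice pattern (some (k : Int)) none) t),
          0 < t.toList.length ∧ k + t.toList.length ≤ n := by
        intro t ht
        rw [List.mem_filter] at ht
        have h1 : t.toList ≠ [] := hne t ht.1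
        have h2 : PySem.Chars.startswith (s.drop k) t.toList = true := by
          rw [← hsw]; exact ht.2
        rw [PySem.Chars.startswith_iff] at h2
        have := h2.length_le
        simp only [List.length_drop] at this
        refine ⟨List.length_pos_iff.mpr h1, by omega⟩
      obtain ⟨hlen2, hval2⟩ := pv_push_loop k n _ w hlen hfilt (by omega)
      refine ⟨hlen2, ?_⟩
      intro j hj
      rw [hval2 j, hval j hj, hwk]
      unfold pvPartial
      rw [List.range_succ, List.map_append, List.sum_append]
      simp only [List.map_cons, List.map_nil, List.sum_cons, List.sum_nil, add_zero]
      rw [add_assoc]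
      congr 1
      congr 1
      unfold pvContrib
      rw [pv_sum_map_filter]
      refine congrArg List.sum ?_
      apply List.map_congr_left
      intro t _
      rw [hsw]
      by_cases h1 : PySem.Chars.startswith (s.drop k) t.toList = true
      · rw [if_pos h1]
        by_cases h2 : k + t.toList.length = j
        · rw [if_pos h2, if_pos ⟨h1, h2⟩]
        · rw [if_neg h2, if_neg (by rintro ⟨-, hh⟩; exact h2 hh)]
      · rw [if_neg h1, if_neg (by rintro ⟨hh, -⟩; exact h1 hh)]
    · rw [if_neg hpos]
      refine ⟨hlen, ?_⟩
      intro j hj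
      rw [hval j hj]
      have hW0 : pvW s ts k = 0 :=
        le_antisymm (by rw [← hwk]; omega) (pvW_nonneg s ts k)
      unfold pvPartial
      rw [List.range_succ, List.map_append, List.sum_append]
      simp only [List.map_cons, List.map_nil, List.sum_cons, List.sum_nil, add_zero]
      have : pvContrib s ts k j = 0 := by
        unfold pvContrib
        apply List.sum_eq_zero
        intro x hx
        simp only [List.mem_map] at hx
        obtain ⟨t, _, rfl⟩ := hx
        rw [hW0]
        simp
      rw [this, add_zero]

-- A computes pvW n
lemma pvA_eq (pattern : String) (towels : List String)
    (hne : ∀ t ∈ towels, t.toList ≠ []) :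
    ways_to_make_pattern pattern towels = pvW pattern.toList towels pattern.toList.length := by
  unfold ways_to_make_pattern
  obtain ⟨-, hval⟩ := pv_outer_loop pattern towels hne pattern.toList.length le_rfl
  simp only []
  rw [hval pattern.toList.length le_rfl,
    pvPartial_eq pattern.toList towels hne _ _ le_rfl]

-- B-side: the inner length-driven sum computes pvW j, for any dp list D that holds
-- pvW at the already-filled positions and 0 at position j itself
lemma pvB_inner (pattern : String) (towels : List String) (j : Nat)
    (hj1 : 1 ≤ j) (hjn : j ≤ pattern.toList.length) (D : List Int)
    (hD1 : ∀ L, 1 ≤ L → L ≤ j → D.getD (j - L) 0 = pvW pattern.toList towels (j - L))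
    (hDj : D.getD j 0 = 0) :
    ((PySem.List.sorted (PySem.Set.ofList (towels.map (fun t => t.toList.length))) (fun L => L)).foldl
      (fun total L =>
        if L ≤ j then
          total + (towels.foldl (fun d t => d.insert t (d.getD t 0 + 1)) PySem.Dict.empty).getD
              (PySem.Str.slice pattern (some ((j : Int) - (L : Int))) (some (j : Int))) 0
            * D.getD (j - L) 0
        else total) 0) = pvW pattern.toList towels j := by
  set s := pattern.toList with hs
  set lengths := PySem.List.sorted (PySem.Set.ofList (towels.map (fun t => t.toList.length))) (fun L => L) with hlengths
  have hlnd : lengths.Nodup :=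
    ((PySem.List.sorted_perm _ _ _).nodup_iff).mpr (PySem.Set.nodup_ofList _)
  have hlmem : ∀ L, L ∈ lengths ↔ ∃ t ∈ towels, t.toList.length = L := by
    intro L
    rw [hlengths, (PySem.List.sorted_perm _ _ _).mem_iff, PySem.Set.mem_ofList]
    simp
  -- the dict lookup is a count
  have hcnt : ∀ (c : String),
      (towels.foldl (fun d t => d.insert t (d.getD t 0 + 1)) PySem.Dict.empty).getD c 0
        = (towels.count c : Int) := by
    intro c
    rw [PySem.Dict.getD_foldl_insert_add_one]
    simp
  -- the slice is take of drop
  have hslice : ∀ L : Nat, L ≤ j →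
      (PySem.Str.slice pattern (some ((j : Int) - (L : Int))) (some (j : Int))).toList
        = (s.drop (j - L)).take L := by
    intro L hL
    rw [PySem.Str.toList_slice, PySem.Chars.slice_eq_listSlice]
    rw [show ((j : Int) - (L : Int)) = ((j - L : Nat) : Int) by omega]
    rw [PySem.List.slice_natCast]
    congr 1
    omega
  -- turn the foldl into a guarded sum
  have h1 : lengths.foldl (fun total L =>
      if L ≤ j then
        total + (towels.foldl (fun d t => d.insert t (d.getD t 0 + 1)) PySem.Dict.empty).getD
            (PySem.Str.slice pattern (some ((j : Int) - (L : Int))) (some (j : Int))) 0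
          * D.getD (j - L) 0
      else total) 0
    = (0 : Int) + (lengths.map (fun L => if L ≤ j then
        (towels.count (PySem.Str.slice pattern (some ((j : Int) - (L : Int))) (some (j : Int))) : Int)
          * D.getD (j - L) 0 else 0)).sum := by
    rw [show (fun (total : Int) (L : Nat) =>
      if L ≤ j then
        total + (towels.foldl (fun d t => d.insert t (d.getD t 0 + 1)) PySem.Dict.empty).getD
            (PySem.Str.slice pattern (some ((j : Int) - (L : Int))) (some (j : Int))) 0
          * D.getD (j - L) 0
      else total)
      = (fun (total : Int) (L : Nat) => total + (if L ≤ j then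
        (towels.count (PySem.Str.slice pattern (some ((j : Int) - (L : Int))) (some (j : Int))) : Int)
          * D.getD (j - L) 0 else 0)) from ?_]
    · exact PySem.List.foldl_add lengths _ 0
    · funext total L
      by_cases hL : L ≤ j
      · rw [if_pos hL, if_pos hL, hcnt]
      · rw [if_neg hL, if_neg hL, add_zero]
  rw [h1, zero_add]
  -- rewrite each length term as a sum over towels, then swap
  have h2 : (lengths.map (fun L => if L ≤ j then
        (towels.count (PySem.Str.slice pattern (some ((j : Int) - (L : Int))) (some (j : Int))) : Int)
          * D.getD (j - L) 0 else 0)).sum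
      = (lengths.map (fun L => (towels.map (fun t =>
          if 1 ≤ L ∧ L ≤ j ∧ t.toList = (s.drop (j - L)).take L
          then pvW s towels (j - L) else 0)).sum)).sum := by
    apply congrArg
    apply List.map_congr_left
    intro L _
    by_cases hL1 : 1 ≤ L
    · by_cases hLj : L ≤ j
      · rw [if_pos hLj, pv_count_mul, hD1 L hL1 hLj]
        apply congrArg
        apply List.map_congr_left
        intro t _
        have heq : (t = PySem.Str.slice pattern (some ((j : Int) - (L : Int))) (some (j : Int)))
            ↔ t.toList = (s.drop (j - L)).take L := by
          rw [← hslice L hLj]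
          constructor
          · rintro rfl; rfl
          · intro h
            have : String.ofList t.toList = String.ofList (PySem.Str.slice pattern (some ((j : Int) - (L : Int))) (some (j : Int))).toList := by rw [h]
            rwa [String.ofList_toList, String.ofList_toList] at this
        by_cases h : t.toList = (s.drop (j - L)).take L
        · rw [if_pos (heq.mpr h), if_pos ⟨hL1, hLj, h⟩]
        · rw [if_neg (fun hh => h (heq.mp hh)), if_neg (by rintro ⟨-, -, hh⟩; exact h hh)]
      · rw [if_neg hLj]
        symm
        apply List.sum_eq_zero
        intro x hx
        simp only [List.mem_map] at hx
        obtain ⟨t, -, rfl⟩ := hx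
        rw [if_neg (by rintro ⟨-, h, -⟩; exact hLj h)]
    · -- L = 0: the yet-unfilled cell D[j] is 0, so the term vanishes
      have hL0 : L = 0 := by omega
      subst hL0
      rw [if_pos (by omega)]
      simp only [Nat.sub_zero, hDj, mul_zero]
      symm
      apply List.sum_eq_zero
      intro x hx
      simp only [List.mem_map] at hx
      obtain ⟨t, -, rfl⟩ := hx
      rw [if_neg (by rintro ⟨h, -, -⟩; omega)]
  rw [h2, pv_sum_comm]
  -- for each towel the condition pins L = |t|
  obtain ⟨j', rfl⟩ : ∃ j', j = j' + 1 := ⟨j - 1, by omega⟩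
  rw [pvW_succ]
  apply congrArg
  apply List.map_congr_left
  intro t ht
  have hpin : ∀ L, L ≤ j' + 1 → t.toList = (s.drop (j' + 1 - L)).take L → L = t.toList.length := by
    intro L hL h
    have : t.toList.length = ((s.drop (j' + 1 - L)).take L).length := by rw [h]
    simp only [List.length_take, List.length_drop] at this
    omega
  have hrw : (fun L => if 1 ≤ L ∧ L ≤ j' + 1 ∧ t.toList = (s.drop (j' + 1 - L)).take L
        then pvW s towels (j' + 1 - L) else 0)
      = (fun L => if L = t.toList.length ∧
          (1 ≤ t.toList.length ∧ t.toList.length ≤ j' + 1 ∧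
            t.toList = (s.drop (j' + 1 - t.toList.length)).take t.toList.length)
        then pvW s towels (j' + 1 - t.toList.length) else 0) := by
    funext L
    by_cases h : 1 ≤ L ∧ L ≤ j' + 1 ∧ t.toList = (s.drop (j' + 1 - L)).take L
    · have hL : L = t.toList.length := hpin L h.2.1 h.2.2
      subst hL
      rw [if_pos h, if_pos ⟨rfl, h⟩]
    · rw [if_neg h, if_neg ?_]
      rintro ⟨rfl, hh⟩
      exact h hh
  rw [hrw]
  by_cases hA : 1 ≤ t.toList.length ∧ t.toList.length ≤ j' + 1 ∧
      t.toList = (s.drop (j' + 1 - t.toList.length)).take t.toList.length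
  · rw [show (fun L => if L = t.toList.length ∧
          (1 ≤ t.toList.length ∧ t.toList.length ≤ j' + 1 ∧
            t.toList = (s.drop (j' + 1 - t.toList.length)).take t.toList.length)
        then pvW s towels (j' + 1 - t.toList.length) else 0)
        = (fun L => if L = t.toList.length
            then pvW s towels (j' + 1 - t.toList.length) else 0) from ?_]
    · rw [pv_sum_ite_eq lengths hlnd, if_pos ((hlmem _).mpr ⟨t, ht, rfl⟩),
        if_pos ⟨by omega, hA.2.1, (pv_startswith_iff_take _ _).mpr hA.2.2.symm⟩]
    · funext L
      by_cases hL : L = t.toList.length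
      · rw [if_pos ⟨hL, hA⟩, if_pos hL]
      · rw [if_neg (by rintro ⟨hh, -⟩; exact hL hh), if_neg hL]
  · rw [if_neg ?_]
    · apply List.sum_eq_zero
      intro x hx
      simp only [List.mem_map] at hx
      obtain ⟨L, -, rfl⟩ := hx
      rw [if_neg (by rintro ⟨-, hh⟩; exact hA hh)]
    · rintro ⟨h0, h1, h2⟩
      exact hA ⟨by omega, h1, ((pv_startswith_iff_take _ _).mp h2).symm⟩

-- B's dp array, filled left to right, is the list of pvW values
lemma pvB_eq (pattern : String) (towels : List String) :
    ways_to_make_pattern_alt pattern towels = pvW pattern.toList towels pattern.toList.length := by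
  unfold ways_to_make_pattern_alt
  simp only []
  set s := pattern.toList with hs
  set n := s.length with hn
  have hdp : ∀ m, m ≤ n → (List.range' 1 m).foldl (fun (dp : List Int) (j : Nat) =>
      dp.set j ((PySem.List.sorted (PySem.Set.ofList (towels.map (fun t => t.toList.length))) (fun L => L)).foldl
        (fun total L =>
          if L ≤ j then
            total + (towels.foldl (fun d t => d.insert t (d.getD t 0 + 1)) PySem.Dict.empty).getD
                (PySem.Str.slice pattern (some ((j : Int) - (L : Int))) (some (j : Int))) 0
              * dp.getD (j - L) 0
          else total) 0)) ((List.replicate (n + 1) (0 : Int)).set 0 1)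
      = (List.range (m + 1)).map (pvW s towels) ++ List.replicate (n - m) 0 := by
    intro m
    induction m with
    | zero =>
      intro _
      simp [List.replicate_succ, List.range_succ, pvW, pvTab]
    | succ m ih =>
      intro hm
      rw [List.range'_1_concat, List.foldl_append, ih (by omega), List.foldl_cons, List.foldl_nil]
      rw [hn, hs] at hm
      set prefixList := (List.range (m + 1)).map (pvW s towels) with hpre
      have hplen : prefixList.length = m + 1 := by simp [hpre]
      have hD1 : ∀ L, 1 ≤ L → L ≤ 1 + m →
          (prefixList ++ List.replicate (n - m) 0).getD (1 + m - L) 0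
            = pvW s towels (1 + m - L) := by
        intro L hL1 hL2
        rw [List.getD_append _ _ _ _ (by rw [hplen]; omega)]
        rw [hpre]
        exact PySem.List.getD_map_range _ _ _ _ (by omega)
      have hDj : (prefixList ++ List.replicate (n - m) 0).getD (1 + m) 0 = 0 := by
        rw [List.getD_append_right _ _ _ _ (by rw [hplen]; omega), hplen,
          show 1 + m - (m + 1) = 0 by omega]
        cases h : n - m <;> simp [List.replicate_succ]
      have hinner := pvB_inner pattern towels (1 + m) (by omega) (by omega)
        (prefixList ++ List.replicate (n - m) 0) hD1 hDj
      have hmn : m < n := by rw [hn, hs]; omega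
      rw [hinner]
      rw [show (1 + m) = prefixList.length by rw [hplen]; omega]
      rw [List.set_append_right _ _ (le_refl _), Nat.sub_self]
      rw [show n - m = (n - (m + 1)) + 1 by omega, List.replicate_succ, List.set_cons_zero]
      rw [hplen]
      rw [List.range_succ, List.map_append, hpre]
      simp
      rw [hs]
  rw [hdp n le_rfl]
  rw [List.getD_append _ _ _ _ (by simp)]
  exact PySem.List.getD_map_range _ _ _ _ (by omega)

-- when no nonempty towel starts the pattern, every positive prefix count is 0
lemma pvW_zero (s : List Char) (towels : List String)
    (hnp : ∀ t ∈ towels, t.toList ≠ [] → ¬ (t.toList <+: s)) :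
    ∀ j, 1 ≤ j → pvW s towels j = 0 := by
  intro j
  induction j using Nat.strong_induction_on with
  | _ j ih =>
    match j with
    | 0 => omega
    | j + 1 =>
      intro _
      rw [pvW_succ]
      apply List.sum_eq_zero
      intro x hx
      simp only [List.mem_map] at hx
      obtain ⟨t, ht, rfl⟩ := hx
      split_ifs with hcond
      · obtain ⟨h0, h1, h2⟩ := hcond
        by_cases hall : t.toList.length = j + 1
        · exfalso
          apply hnp t ht (by intro h; rw [h] at h0; simp at h0)
          rw [PySem.Chars.startswith_iff] at h2
          rw [show j + 1 - t.toList.length = 0 by omega] at h2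
          simpa using h2
        · exact ih (j + 1 - t.toList.length) (by omega) (by omega)
      · rfl

-- a push loop of only empty towels never touches cells 1..
lemma pv_push_empty : ∀ (us : List String) (w : List Int),
    (∀ t ∈ us, t.toList.length = 0) →
    ((us.foldl (fun w2 t => w2.set (0 + t.toList.length)
        (w2.getD (0 + t.toList.length) 0 + w2.getD 0 0)) w).length = w.length ∧
     ∀ j, 1 ≤ j → (us.foldl (fun w2 t => w2.set (0 + t.toList.length)
        (w2.getD (0 + t.toList.length) 0 + w2.getD 0 0)) w).getD j 0 = w.getD j 0) := by
  intro us
  induction us with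
  | nil => intro w _; exact ⟨rfl, fun _ _ => rfl⟩
  | cons t rest ih =>
    intro w hus
    have ht : t.toList.length = 0 := hus t (by simp)
    obtain ⟨hlen, hval⟩ := ih (w.set (0 + t.toList.length)
      (w.getD (0 + t.toList.length) 0 + w.getD 0 0)) (fun u hu => hus u (by simp [hu]))
    refine ⟨by rw [List.foldl_cons, hlen, List.length_set], ?_⟩
    intro j hj
    rw [List.foldl_cons, hval j hj, ht]
    simp only [Nat.add_zero]
    simp [List.getD, List.getElem?_set_ne (show (0 : Nat) ≠ j by omega)]

-- when no nonempty towel starts the pattern, A returns 0 on a nonempty pattern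
lemma pvA_zero (pattern : String) (towels : List String)
    (hnp : ∀ t ∈ towels, t.toList ≠ [] → ¬ (t.toList <+: pattern.toList))
    (hn1 : 1 ≤ pattern.toList.length) :
    ways_to_make_pattern pattern towels = 0 := by
  unfold ways_to_make_pattern
  simp only []
  set s := pattern.toList with hs
  set n := s.length with hn
  have key : ∀ k, k ≤ n →
      ∀ j, 1 ≤ j →
      ((List.range k).foldl (fun (w : List Int) (i : Nat) =>
        if w.getD i 0 > 0 then
          (towels.filter (fun t => PySem.Str.startswith
              (PySem.Str.slice pattern (some (i : Int)) none) t)).foldl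
            (fun w2 t => w2.set (i + t.toList.length)
              (w2.getD (i + t.toList.length) 0 + w2.getD i 0)) w
        else w)
        ((List.replicate (n + 1) (0 : Int)).set 0 1)).getD j 0 = 0 := by
    intro k
    induction k with
    | zero =>
      intro _ j hj
      simp only [List.range_zero, List.foldl_nil]
      by_cases hjn : j ≤ n
      · simp [List.getD, (by omega : j < n + 1), List.getElem_set, List.getElem_replicate]
        omega
      · rw [List.getD_eq_getElem?_getD, List.getElem?_eq_none (by simp; omega)]
        rfl
    | succ k ih =>
      intro hk j hj
      rw [List.range_succ, List.foldl_append, List.foldl_cons, List.foldl_nil]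
      set w := (List.range k).foldl _ ((List.replicate (n + 1) (0 : Int)).set 0 1) with hwdef
      by_cases hpos : w.getD k 0 > 0
      · rw [if_pos hpos]
        have hk0 : k = 0 := by
          by_contra hk0
          exact absurd (ih (by omega) k (by omega)) (by omega)
        subst hk0
        have hfe : ∀ t ∈ towels.filter (fun t => PySem.Str.startswith
            (PySem.Str.slice pattern (some ((0 : Nat) : Int)) none) t), t.toList.length = 0 := by
          intro t htf
          rw [List.mem_filter] at htf
          by_contra hne0
          apply hnp t htf.1 (by intro h; rw [h] at hne0; simp at hne0)
          have hsl : (PySem.Str.slice pattern (some ((0 : Nat) : Int)) none).toList = s := by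
            rw [PySem.Str.toList_slice, PySem.Chars.slice_eq_listSlice,
              PySem.List.slice_from_natCast, List.drop_zero]
          have h2 := htf.2
          rw [show PySem.Str.startswith (PySem.Str.slice pattern (some ((0 : Nat) : Int)) none) t
              = PySem.Chars.startswith (PySem.Str.slice pattern (some ((0 : Nat) : Int)) none).toList t.toList
            from by simp [PySem.Str.startswith]] at h2
          rw [hsl, PySem.Chars.startswith_iff] at h2
          exact h2
        obtain ⟨-, hval⟩ := pv_push_empty _ w hfe
        rw [hval j hj]
        exact ih (by omega) j hj
      · rw [if_neg hpos]
        exact ih (by omega) j hj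
  exact key n le_rfl n (by omega)

-- the empty-pattern case (allowed by Pre_ even with empty towels)
-- the empty-pattern case (allowed by Pre_ even with empty towels)
lemma pv_empty (towels : List String) :
    ways_to_make_pattern "" towels = 1 ∧ ways_to_make_pattern_alt "" towels = 1 := by
  constructor <;> rfl

-- ===== VERDICT (by name: the statement is the Claim_ definition above) =====
theorem ways_to_make_pattern_spec : Claim_equal_ways_to_make_pattern := by
  intro pattern towels _ hpre
  unfold Spec_ways_to_make_pattern
  by_cases hp : pattern = ""
  · subst hp
    rw [(pv_empty towels).1, (pv_empty towels).2]
  · rcases hpre with h | hne | hnp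
    · exact absurd h hp
    · have hne' : ∀ t ∈ towels, t.toList ≠ [] := by
        intro t ht
        rw [ne_eq, String.toList_eq_nil_iff]
        intro h
        subst h
        exact hne ht
      rw [pvA_eq pattern towels hne', pvB_eq pattern towels]
    · have hnp' : ∀ t ∈ towels, t.toList ≠ [] → ¬ (t.toList <+: pattern.toList) := by
        intro t ht h
        exact hnp t ht (by intro hh; subst hh; simp at h)
      have hn1 : 1 ≤ pattern.toList.length := by
        rcases Nat.eq_zero_or_pos pattern.toList.length with h | h
        · exact absurd (String.toList_eq_nil_iff.mp (List.length_eq_zero_iff.mp h)) hp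
        · omega
      rw [pvA_zero pattern towels hnp' hn1, pvB_eq pattern towels,
        pvW_zero pattern.toList towels hnp' _ hn1]
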